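-- pv_equiv track=rewrite | github.com/nestorNeo/WFNAPP | src/core/petrinet.py | should_skip_bridge
-- ===== SOURCE A (Python) =====
-- def should_skip_bridge(a, b, traces):
--     """
--     Determina si un bridge debe ser omitido:
--     1. No bridges si las trazas empiezan igual y el bridge viene del inicio
--     2. No bridges desde una agrupación a una subtraza compartida
--     3. No bridges si los caminos van a agrupaciones diferentes
--     4. No bridges entre subtrazas compartidas
--     """
--     # Función auxiliar para verificar si un evento es parte de una subtraza compartida
--     def is_shared_event(event, pos, traces):
--         return all(pos < len(t) and t[pos] == event for t in traces)
--
--     # Verificar si ambos eventos son parte de subtrazas compartidas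
--     for trace in traces:
--         try:
--             pos_a = trace.index(a)
--             pos_b = trace.index(b)
--             if is_shared_event(a, pos_a, traces) and is_shared_event(b, pos_b, traces):
--                 return True
--         except ValueError:
--             continue
--
--     # Verificar si todas las trazas empiezan igual
--     first_events = set(trace[0] for trace in traces)
--     if len(first_events) == 1:
--         # Si es un bridge desde el inicio, omitirlo
--         first_event = next(iter(first_events))
--         if a == first_event:
--             return True
--
--     def is_shared_event(event, pos, traces):
--         return all(pos < len(t) and t[pos] == event for t in traces)
--
--     def leads_to_different_groups(pos_a, traces):
--         next_groups = set()
--         for t in traces: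
--             if pos_a + 1 < len(t):
--                 # Obtener el siguiente evento
--                 next_event = t[pos_a + 1]
--                 # Buscar la siguiente agrupación después de este evento
--                 for i in range(pos_a + 1, len(t)):
--                     if '||' in str(t[i]):
--                         next_groups.add(t[i])
--                         break
--         return len(next_groups) > 1
--
--     # Caso 1: Si 'a' es una agrupación y 'b' es parte de una subtraza compartida
--     if '||' in str(a):
--         for trace in traces:
--             try:
--                 pos_a = trace.index(a)
--                 pos_b = trace.index(b)
--                 if is_shared_event(b, pos_b, traces):
--                     return True
--             except ValueError:
--                 continue
--
--     # Caso 2: Si viene después de una agrupación y va a diferentes agrupaciones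
--     if not '||' in str(a):  # Si no es una agrupación
--         for i, trace in enumerate(traces):
--             try:
--                 pos_a = trace.index(a)
--                 # Verificar si viene después de una agrupación
--                 if pos_a > 0 and '||' in str(trace[pos_a - 1]):
--                     # Verificar si lleva a diferentes agrupaciones
--                     if leads_to_different_groups(pos_a, traces):
--                         return True
--             except ValueError:
--                 continue
--
--     return False
-- ===== SOURCE B (Python) =====
-- def should_skip_bridge(a, b, traces):
--     # One pass of preprocessing, then each check is a direct lookup:
--     # per-trace first-occurrence index dicts, a per-position shared-event
--     # table, and per-trace suffix tables of the next '||' group.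
--     idx = []
--     for t in traces:
--         d = {}
--         for i, e in enumerate(t):
--             d.setdefault(e, i)
--         idx.append(d)
--
--     minlen = min((len(t) for t in traces), default=0)
--     shared_at = []
--     for p in range(minlen):
--         e0 = traces[0][p]
--         shared_at.append(e0 if all(t[p] == e0 for t in traces) else None)
--
--     def is_shared(event, pos):
--         return pos < minlen and shared_at[pos] == event
--
--     # nextgrp[ti][i] = first element of traces[ti] at index >= i containing '||'
--     nextgrp = []
--     for t in traces:
--         ng = [None] * (len(t) + 1)
--         for i in range(len(t) - 1, -1, -1):
--             ng[i] = t[i] if '||' in t[i] else ng[i + 1]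
--         nextgrp.append(ng)
--
--     # Both events on a shared subtrace (in some trace containing both)
--     for d in idx:
--         if a in d and b in d and is_shared(a, d[a]) and is_shared(b, d[b]):
--             return True
--
--     # All traces start with the same event and the bridge leaves it
--     if shared_at and shared_at[0] is not None and a == shared_at[0]:
--         return True
--
--     if '||' in a:
--         # Grouping -> shared event
--         for d in idx:
--             if a in d and b in d and is_shared(b, d[b]):
--                 return True
--     else:
--         # After a grouping, leading to different groups
--         for ti, t in enumerate(traces):
--             d = idx[ti]
--             if a in d:
--                 p = d[a]
--                 if p > 0 and '||' in t[p - 1]: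
--                     groups = set()
--                     for tj, tt in enumerate(traces):
--                         if p + 1 < len(tt):
--                             g = nextgrp[tj][p + 1]
--                             if g is not None:
--                                 groups.add(g)
--                     if len(groups) > 1:
--                         return True
--     return False
-- ===== Notes on version B (the rewrite author's own statement) =====
-- stated objective: faster
-- what changed: B precomputes in one pass per-trace first-occurrence index dicts, a per-position shared-event table, and per-trace suffix tables of the next '||' group, so every check A answers by rescanning traces (trace.index, is_shared, the inner group search) becomes a constant-time lookup.
import Mathlib
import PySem

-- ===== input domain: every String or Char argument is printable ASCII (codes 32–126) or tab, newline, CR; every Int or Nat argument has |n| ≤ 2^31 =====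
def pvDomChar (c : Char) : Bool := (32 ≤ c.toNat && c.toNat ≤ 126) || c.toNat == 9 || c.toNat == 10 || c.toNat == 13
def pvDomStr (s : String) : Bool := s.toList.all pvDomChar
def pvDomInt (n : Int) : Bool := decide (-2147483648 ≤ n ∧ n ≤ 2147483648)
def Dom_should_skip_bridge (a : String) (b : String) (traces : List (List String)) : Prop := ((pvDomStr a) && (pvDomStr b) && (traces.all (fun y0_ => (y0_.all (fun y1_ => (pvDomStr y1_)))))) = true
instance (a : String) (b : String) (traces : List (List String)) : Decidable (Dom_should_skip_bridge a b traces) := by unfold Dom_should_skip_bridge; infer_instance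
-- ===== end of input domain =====

-- B replaces A's repeated rescans (trace.index, is_shared, the inner group search) by
-- one preprocessing pass: per-trace index dicts, a per-position shared-event table and
-- per-trace next-'||'-group suffix tables; objective: faster (O(T*L) instead of O(T^2*L)).

-- ===== PORT A =====
-- '||' in str(x) (x is a string here)
def pvIsInGrp (s : String) : Bool := PySem.Str.isIn "||" s

-- is_shared_event(event, pos, traces): all(pos < len(t) and t[pos] == event for t in traces)
def pvIsShared (event : String) (pos : Nat) (traces : List (List String)) : Bool :=
  traces.all (fun t => decide (pos < t.length) && (PySem.List.pyGet? t (pos : Int) == some event))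

-- first for-loop: try trace.index(a) / trace.index(b) (ValueError → continue)
def pvLoop1 (a b : String) (all : List (List String)) : List (List String) → Bool
  | [] => false
  | t :: rest =>
    match PySem.List.index? t a, PySem.List.index? t b with
    | some pa, some pb =>
      if pvIsShared a pa all && pvIsShared b pb all then true else pvLoop1 a b all rest
    | _, _ => pvLoop1 a b all rest

-- 'for i in range(pos_a+1, len(t)): if "||" in t[i]: …; break' on t.drop (pos_a+1):
-- first element containing '||', scanned left to right, exactly the index loop
def pvFirstGroup : List String → Option String
  | [] => none
  | e :: rest => if pvIsInGrp e then some e else pvFirstGroup rest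

-- leads_to_different_groups(pos_a, traces)
def pvLtdg (pos : Nat) (traces : List (List String)) : Bool :=
  let groups := traces.foldl (fun g t =>
    if pos + 1 < t.length then
      match pvFirstGroup (t.drop (pos + 1)) with
      | some e => PySem.Set.add g e
      | none => g
    else g) ([] : PySem.Set String)
  decide (1 < groups.length)

-- Caso 1 loop
def pvLoop2 (a b : String) (all : List (List String)) : List (List String) → Bool
  | [] => false
  | t :: rest =>
    match PySem.List.index? t a, PySem.List.index? t b with
    | some _, some pb => if pvIsShared b pb all then true else pvLoop2 a b all rest
    | _, _ => pvLoop2 a b all rest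

-- Caso 2 loop
def pvLoop3 (a : String) (all : List (List String)) : List (List String) → Bool
  | [] => false
  | t :: rest =>
    match PySem.List.index? t a with
    | some pa =>
      if 0 < pa && pvIsInGrp ((PySem.List.pyGet? t ((pa : Int) - 1)).getD "") && pvLtdg pa all
      then true else pvLoop3 a all rest
    | none => pvLoop3 a all rest

def should_skip_bridge (a : String) (b : String) (traces : List (List String)) : Bool :=
  if pvLoop1 a b traces traces then true
  else
    -- set(trace[0] for trace in traces); trace[0] raises IndexError on an empty trace
    -- (excluded by Pre_), the .getD "" is never read inside Pre_
    let first_events := PySem.Set.ofList (traces.map (fun t => (PySem.List.pyGet? t (0 : Int)).getD ""))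
    -- next(iter(s)) on a singleton set is its unique element: headD is exact here
    if first_events.length == 1 && a == first_events.headD "" then true
    else if pvIsInGrp a then pvLoop2 a b traces traces
    else pvLoop3 a traces traces

-- ===== PORT B =====
def pvHasGrp (s : String) : Bool := PySem.Str.isIn "||" s

-- d.setdefault(e, i) over enumerate(t): first-occurrence index dict
def pvIdxGo : List String → Nat → PySem.Dict String Nat → PySem.Dict String Nat
  | [], _, d => d
  | e :: rest, i, d => pvIdxGo rest (i + 1) (d.setdefault e i)

def pvIdx (t : List String) : PySem.Dict String Nat := pvIdxGo t 0 PySem.Dict.empty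

-- min((len(t) for t in traces), default=0)
def pvMinLen (traces : List (List String)) : Nat :=
  (PySem.List.min? (traces.map List.length) (fun n => n)).getD 0

-- shared_at[p] = traces[0][p] if all traces agree at p, else None
def pvSharedAt (traces : List (List String)) : List (Option String) :=
  (List.range (pvMinLen traces)).map (fun (p : Nat) =>
    let e0 := (PySem.List.pyGet? ((PySem.List.pyGet? traces (0 : Int)).getD []) (p : Int)).getD ""
    if traces.all (fun t => PySem.List.pyGet? t (p : Int) == some e0) then some e0 else none)

def pvIsSharedB (minlen : Nat) (sharedAt : List (Option String)) (event : String) (pos : Nat) : Bool :=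
  decide (pos < minlen) && ((sharedAt[pos]?).getD none == some event)

-- suffix table: ng[i] = first element of t at index ≥ i containing '||' (None if none)
def pvNg : List String → List (Option String)
  | [] => [none]
  | e :: rest => (if pvHasGrp e then some e else (pvNg rest).headD none) :: pvNg rest

def pvPhase1B (a b : String) (minlen : Nat) (sharedAt : List (Option String)) :
    List (PySem.Dict String Nat) → Bool
  | [] => false
  | d :: rest =>
    match d.get? a, d.get? b with
    | some pa, some pb =>
      if pvIsSharedB minlen sharedAt a pa && pvIsSharedB minlen sharedAt b pb then true
      else pvPhase1B a b minlen sharedAt rest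
    | _, _ => pvPhase1B a b minlen sharedAt rest

def pvCase1B (a b : String) (minlen : Nat) (sharedAt : List (Option String)) :
    List (PySem.Dict String Nat) → Bool
  | [] => false
  | d :: rest =>
    match d.get? a, d.get? b with
    | some _, some pb =>
      if pvIsSharedB minlen sharedAt b pb then true else pvCase1B a b minlen sharedAt rest
    | _, _ => pvCase1B a b minlen sharedAt rest

-- {nextgrp[tj][p+1] | p+1 < len(traces[tj]), entry not None}
def pvGroupsB (p : Nat) (pairs : List (List String × List (Option String))) : PySem.Set String :=
  pairs.foldl (fun g pr =>
    if p + 1 < pr.1.length then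
      match (pr.2[p + 1]?).getD none with
      | some e => PySem.Set.add g e
      | none => g
    else g) ([] : PySem.Set String)

def pvCase2B (a : String) (pairsAll : List (List String × List (Option String))) :
    List (List String × PySem.Dict String Nat) → Bool
  | [] => false
  | (t, d) :: rest =>
    match d.get? a with
    | some p =>
      if 0 < p && pvHasGrp ((PySem.List.pyGet? t ((p : Int) - 1)).getD "") then
        if 1 < (pvGroupsB p pairsAll).length then true else pvCase2B a pairsAll rest
      else pvCase2B a pairsAll rest
    | none => pvCase2B a pairsAll rest

def should_skip_bridge_alt (a : String) (b : String) (traces : List (List String)) : Bool :=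
  let idxs := traces.map pvIdx
  let minlen := pvMinLen traces
  let sharedAt := pvSharedAt traces
  let ngs := traces.map pvNg
  if pvPhase1B a b minlen sharedAt idxs then true
  else if !sharedAt.isEmpty && (sharedAt.headD none == some a) then true
  else if pvHasGrp a then pvCase1B a b minlen sharedAt idxs
  else pvCase2B a (traces.zip ngs) (traces.zip idxs)

-- ===== PRECONDITION & SPEC =====
-- Pre_ excludes inputs where some trace is empty: there A raises IndexError (trace[0]).
def Pre_should_skip_bridge (a : String) (b : String) (traces : List (List String)) : Prop :=
  ∀ t ∈ traces, t ≠ []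
instance (a : String) (b : String) (traces : List (List String)) : Decidable (Pre_should_skip_bridge a b traces) := by unfold Pre_should_skip_bridge; infer_instance

def pvWitness_should_skip_bridge : String × String × List (List String) :=
  ("x", "y", [["x", "a||b", "y"], ["x", "c||d", "y"]])

def Spec_should_skip_bridge (a : String) (b : String) (traces : List (List String)) (out : Bool) : Prop := out = should_skip_bridge_alt a b traces
instance (a : String) (b : String) (traces : List (List String)) (out : Bool) : Decidable (Spec_should_skip_bridge a b traces out) := by unfold Spec_should_skip_bridge; infer_instance

-- ===== CLAIM (what is proved, stated in full; the proofs are below) =====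
def Claim_equal_should_skip_bridge : Prop := ∀ (a : String) (b : String) (traces : List (List String)), Dom_should_skip_bridge a b traces → Pre_should_skip_bridge a b traces → Spec_should_skip_bridge a b traces (should_skip_bridge a b traces)

-- ===== LEMMAS AND PROOFS =====

-- the index dict computes list.index
theorem pvIdxGo_get? (t : List String) : ∀ (i : Nat) (d : PySem.Dict String Nat) (e : String),
    (pvIdxGo t i d).get? e =
      if (d.get? e).isSome then d.get? e else (PySem.List.index? t e).map (· + i) := by
  induction t with
  | nil =>
    intro i d e
    cases h : d.get? e <;> simp [pvIdxGo, h, PySem.List.index?]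
  | cons x rest ih =>
    intro i d e
    simp only [pvIdxGo, ih]
    by_cases hx : e = x
    · subst hx
      rw [PySem.Dict.get?_setdefault_self d e i]
      rw [PySem.List.index?_cons_self]
      cases d.get? e <;> simp
    · rw [PySem.Dict.get?_setdefault_of_ne d i hx]
      rw [PySem.List.index?_cons_of_ne rest (fun h => hx h.symm)]
      cases d.get? e <;> simp [Option.map_map]
      · congr 1; funext k; omega

theorem pvIdx_get? (t : List String) (e : String) :
    (pvIdx t).get? e = PySem.List.index? t e := by
  rw [pvIdx, pvIdxGo_get? t 0 PySem.Dict.empty e]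
  simp [PySem.Dict.get?_empty]


-- the shared-event table computes is_shared_event
theorem pvMinLen_le (traces : List (List String)) (t : List String) (ht : t ∈ traces) :
    pvMinLen traces ≤ t.length := by
  unfold pvMinLen
  cases hm : PySem.List.min? (traces.map List.length) (fun n => n) with
  | none => simp
  | some m =>
    have := PySem.List.min?_isMin hm t.length (List.mem_map_of_mem ht)
    simpa using this

theorem pvMinLen_mem (traces : List (List String)) (hne : traces ≠ []) :
    ∃ t ∈ traces, t.length = pvMinLen traces := by
  unfold pvMinLen
  cases hm : PySem.List.min? (traces.map List.length) (fun n => n) with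
  | none =>
    exact absurd (by simpa using (PySem.List.min?_eq_none_iff _ _).mp hm) hne
  | some m =>
    have hmem := PySem.List.min?_mem hm
    obtain ⟨t, ht, hlen⟩ := List.mem_map.mp hmem
    exact ⟨t, ht, by simp [hlen]⟩

theorem pvIsSharedB_eq (traces : List (List String)) (hne : traces ≠ [])
    (e : String) (p : Nat) :
    pvIsSharedB (pvMinLen traces) (pvSharedAt traces) e p = pvIsShared e p traces := by
  by_cases hp : p < pvMinLen traces
  · -- p is below every trace's length
    have hlt : ∀ t ∈ traces, p < t.length := fun t ht => lt_of_lt_of_le hp (pvMinLen_le traces t ht)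
    obtain ⟨t0, ts, rfl⟩ : ∃ t0 ts, traces = t0 :: ts := by
      cases traces with
      | nil => exact absurd rfl hne
      | cons t0 ts => exact ⟨t0, ts, rfl⟩
    have h0 : p < t0.length := hlt t0 (by simp)
    -- the table entry at p
    have hentry : ((pvSharedAt (t0 :: ts))[p]?).getD none =
        (if (t0 :: ts).all (fun t => PySem.List.pyGet? t (p : Int) == some t0[p]) then some t0[p] else none) := by
      unfold pvSharedAt
      rw [List.getElem?_map, List.getElem?_range hp]
      simp [h0]
    rw [pvIsSharedB, hentry]
    simp only [pvIsShared, decide_eq_true hp, Bool.true_and]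
    by_cases hc : (t0 :: ts).all (fun t => PySem.List.pyGet? t (p : Int) == some t0[p])
    · rw [if_pos hc, Bool.eq_iff_iff]
      simp only [List.all_eq_true, Bool.and_eq_true, decide_eq_true_eq, beq_iff_eq,
        Option.some.injEq] at hc ⊢
      constructor
      · intro he t ht
        refine ⟨hlt t ht, ?_⟩
        rw [hc t ht, he]
      · intro hall
        have := (hall t0 (by simp)).2
        simp [h0] at this
        exact this
    · rw [if_neg hc]
      simp only [show ((none : Option String) == some e) = false from rfl]
      symm
      rw [Bool.eq_false_iff]
      intro hall
      apply hc
      simp only [List.all_eq_true, Bool.and_eq_true, decide_eq_true_eq, beq_iff_eq] at hall ⊢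
      have he0 : t0[p] = e := by
        have := (hall t0 (by simp)).2
        simp [h0] at this
        exact this
      intro t ht
      rw [(hall t ht).2, he0]
  · -- p reaches past the shortest trace: both sides false
    obtain ⟨t, ht, hlen⟩ := pvMinLen_mem traces hne
    have : ¬ p < t.length := by omega
    rw [pvIsSharedB, pvIsShared]
    simp only [decide_eq_false hp, Bool.false_and]
    symm
    rw [List.all_eq_false]
    exact ⟨t, ht, by simp [this]⟩


-- the suffix table computes the first-group scan
theorem pvNg_get (t : List String) : ∀ i, i ≤ t.length →
    ((pvNg t)[i]?).getD none = pvFirstGroup (t.drop i) := by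
  induction t with
  | nil => intro i hi; simp only [List.length_nil, Nat.le_zero] at hi; subst hi; simp [pvNg, pvFirstGroup]
  | cons e rest ih =>
    intro i hi
    cases i with
    | zero =>
      simp only [pvNg, List.getElem?_cons_zero, Option.getD_some, List.drop_zero, pvFirstGroup]
      by_cases hg : pvHasGrp e
      · simp [pvIsInGrp, pvHasGrp] at hg ⊢
        simp [hg]
      · have hh : (pvNg rest).headD none = ((pvNg rest)[0]?).getD none := by
          cases pvNg rest <;> simp
        simp only [if_neg hg]
        rw [hh, ih 0 (by omega)]
        simp [pvIsInGrp, pvHasGrp] at hg ⊢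
        simp [hg]
    | succ j =>
      simp only [pvNg, List.getElem?_cons_succ, List.drop_succ_cons]
      exact ih j (by simpa using hi)


theorem pvGroupsB_eq_core (p : Nat) (ts : List (List String)) : ∀ (g : PySem.Set String),
    (ts.zip (ts.map pvNg)).foldl (fun g pr =>
      if p + 1 < pr.1.length then
        match (pr.2[p + 1]?).getD none with
        | some e => PySem.Set.add g e
        | none => g
      else g) g =
    ts.foldl (fun g t =>
      if p + 1 < t.length then
        match pvFirstGroup (t.drop (p + 1)) with
        | some e => PySem.Set.add g e
        | none => g
      else g) g := by
  induction ts with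
  | nil => intro g; simp
  | cons t rest ih =>
    intro g
    simp only [List.map_cons, List.zip_cons_cons, List.foldl_cons]
    by_cases hl : p + 1 < t.length
    · rw [if_pos hl, if_pos hl, pvNg_get t (p + 1) (by omega)]
      exact ih _
    · rw [if_neg hl, if_neg hl]
      exact ih _


theorem pvLoop1_eq (a b : String) (all : List (List String)) (hne : all ≠ [])
    (rem : List (List String)) :
    pvPhase1B a b (pvMinLen all) (pvSharedAt all) (rem.map pvIdx) = pvLoop1 a b all rem := by
  induction rem with
  | nil => rfl
  | cons t rest ih =>
    simp only [List.map_cons, pvPhase1B, pvLoop1, pvIdx_get?]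
    cases ha : PySem.List.index? t a <;> cases hb : PySem.List.index? t b <;>
      simp only [ih]
    rw [pvIsSharedB_eq all hne, pvIsSharedB_eq all hne]

theorem pvLoop2_eq (a b : String) (all : List (List String)) (hne : all ≠ [])
    (rem : List (List String)) :
    pvCase1B a b (pvMinLen all) (pvSharedAt all) (rem.map pvIdx) = pvLoop2 a b all rem := by
  induction rem with
  | nil => rfl
  | cons t rest ih =>
    simp only [List.map_cons, pvCase1B, pvLoop2, pvIdx_get?]
    cases ha : PySem.List.index? t a <;> cases hb : PySem.List.index? t b <;>
      simp only [ih]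
    rw [pvIsSharedB_eq all hne]

theorem pvLoop3_eq (a : String) (all : List (List String)) (rem : List (List String)) :
    pvCase2B a (all.zip (all.map pvNg)) (rem.zip (rem.map pvIdx)) = pvLoop3 a all rem := by
  induction rem with
  | nil => rfl
  | cons t rest ih =>
    simp only [List.map_cons, List.zip_cons_cons, pvCase2B, pvLoop3, pvIdx_get?]
    cases ha : PySem.List.index? t a with
    | none => exact ih
    | some p =>
      have hgrp : pvGroupsB p (all.zip (all.map pvNg)) =
          all.foldl (fun g t =>
            if p + 1 < t.length then
              match pvFirstGroup (t.drop (p + 1)) with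
              | some e => PySem.Set.add g e
              | none => g
            else g) ([] : PySem.Set String) := pvGroupsB_eq_core p all ([] : PySem.Set String)
    -- align the nested if with A's three-way conjunction
      simp only [pvHasGrp, pvIsInGrp, pvLtdg, ← hgrp]
      by_cases h1 : (0 < p && PySem.Str.isIn "||" ((PySem.List.pyGet? t ((p : Int) - 1)).getD "")) = true
      · rw [if_pos h1]
        by_cases h2 : 1 < (pvGroupsB p (all.zip (all.map pvNg))).length
        · rw [if_pos (by simp [h2]), if_pos (by rw [h1]; simp [h2])]
        · rw [if_neg (by simp [h2]), if_neg (by simp [h2]), ih]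
      · rw [if_neg h1, if_neg (by rw [Bool.eq_false_iff.mpr h1]; simp), ih]

theorem pvFoldlAdd_prefix (xs : List String) : ∀ (s : PySem.Set String),
    ∃ r, List.foldl PySem.Set.add s xs = s ++ r := by
  induction xs with
  | nil => exact fun s => ⟨[], by simp⟩
  | cons x rest ih =>
    intro s
    simp only [List.foldl_cons]
    by_cases hx : x ∈ s
    · rw [PySem.Set.add_of_mem hx]
      exact ih s
    · rw [PySem.Set.add_of_not_mem hx]
      obtain ⟨r, hr⟩ := ih (s ++ [x])
      exact ⟨x :: r, by simpa using hr⟩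

theorem pvFoldlAdd_single (x : String) (xs : List String) :
    List.foldl PySem.Set.add [x] xs = [x] ↔ ∀ y ∈ xs, y = x := by
  induction xs with
  | nil => simp
  | cons y rest ih =>
    simp only [List.foldl_cons, List.mem_cons]
    by_cases hy : y = x
    · subst hy
      rw [PySem.Set.add_of_mem (by simp)]
      rw [ih]
      constructor
      · intro h z hz
        rcases hz with rfl | hz
        · rfl
        · exact h z hz
      · intro h z hz
        exact h z (Or.inr hz)
    · rw [PySem.Set.add_of_not_mem (by simpa using hy)]
      obtain ⟨r, hr⟩ := pvFoldlAdd_prefix rest ([x] ++ [y])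
      rw [hr]
      constructor
      · intro h
        exact absurd (congrArg List.length h) (by simp)
      · intro h
        exact absurd (h y (Or.inl rfl)) hy

theorem pvGet0 {α : Type} (x : α) (xs : List α) : PySem.List.pyGet? (x :: xs) (0 : Int) = some x := by
  simp [PySem.List.pyGet?, PySem.List.pyIdx?]

-- start-of-traces check
theorem pvStart_eq (a : String) (traces : List (List String)) (hne : traces ≠ [])
    (hpre : ∀ t ∈ traces, t ≠ []) :
    ((PySem.Set.ofList (traces.map (fun t => (PySem.List.pyGet? t (0 : Int)).getD ""))).length == 1 &&
      a == (PySem.Set.ofList (traces.map (fun t => (PySem.List.pyGet? t (0 : Int)).getD ""))).headD "") =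
    (!(pvSharedAt traces).isEmpty && ((pvSharedAt traces).headD none == some a)) := by
  obtain ⟨t0, ts, rfl⟩ : ∃ t0 ts, traces = t0 :: ts := by
    cases traces with
    | nil => exact absurd rfl hne
    | cons t0 ts => exact ⟨t0, ts, rfl⟩
  have hml : 0 < pvMinLen (t0 :: ts) := by
    obtain ⟨tm, htm, hlen⟩ := pvMinLen_mem (t0 :: ts) hne
    have htmne := hpre tm htm
    cases tm with
    | nil => exact absurd rfl htmne
    | cons x xs => rw [← hlen]; simp
  have hval : ∀ t : List String, t ≠ [] →
      PySem.List.pyGet? t (0 : Int) = some ((PySem.List.pyGet? t (0 : Int)).getD "") := by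
    intro t ht
    cases t with
    | nil => exact absurd rfl ht
    | cons x xs => rw [pvGet0 x xs]; rfl
  -- head of the shared table is the table entry at position 0
  have hf0 : (pvSharedAt (t0 :: ts)).headD none =
      (if (t0 :: ts).all (fun t => PySem.List.pyGet? t (0 : Int) ==
          some ((PySem.List.pyGet? t0 (0 : Int)).getD "")) then
        some ((PySem.List.pyGet? t0 (0 : Int)).getD "") else none) := by
    have h0 : (pvSharedAt (t0 :: ts)).headD none = ((pvSharedAt (t0 :: ts))[0]?).getD none := by
      cases pvSharedAt (t0 :: ts) <;> simp
    rw [h0]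
    unfold pvSharedAt
    rw [List.getElem?_map, List.getElem?_range hml]
    simp only [pvGet0, Option.map_some, Option.getD_some, Nat.cast_zero]
  have hsne : (pvSharedAt (t0 :: ts)).isEmpty = false := by
    unfold pvSharedAt
    simp only [List.isEmpty_eq_false_iff, ne_eq, List.map_eq_nil_iff, List.range_eq_nil]
    omega
  -- the set of first events is [v0] ++ r
  have hfold : PySem.Set.ofList (((t0 :: ts)).map (fun t => (PySem.List.pyGet? t (0 : Int)).getD "")) =
      List.foldl PySem.Set.add [(PySem.List.pyGet? t0 (0 : Int)).getD ""]
        (ts.map (fun t => (PySem.List.pyGet? t (0 : Int)).getD "")) := by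
    show List.foldl PySem.Set.add [] _ = _
    rw [List.map_cons, List.foldl_cons]
    congr 1
  obtain ⟨r, hr⟩ := pvFoldlAdd_prefix
    (ts.map (fun t => (PySem.List.pyGet? t (0 : Int)).getD ""))
    [(PySem.List.pyGet? t0 (0 : Int)).getD ""]
  rw [Bool.eq_iff_iff]
  simp only [Bool.and_eq_true, beq_iff_eq, hsne, Bool.not_false, Bool.true_and, hfold, hf0]
  constructor
  · rintro ⟨hlen1, hah⟩
    have hr1 : r = [] := by
      rw [hr] at hlen1
      simpa using hlen1
    have heq : List.foldl PySem.Set.add [(PySem.List.pyGet? t0 (0 : Int)).getD ""]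
        (ts.map (fun t => (PySem.List.pyGet? t (0 : Int)).getD "")) =
        [(PySem.List.pyGet? t0 (0 : Int)).getD ""] := by rw [hr, hr1]; simp
    have hall := (pvFoldlAdd_single _ _).mp heq
    have hcond : (t0 :: ts).all (fun t => PySem.List.pyGet? t (0 : Int) ==
        some ((PySem.List.pyGet? t0 (0 : Int)).getD "")) = true := by
      rw [List.all_eq_true]
      intro t ht
      rw [beq_iff_eq, hval t (hpre t ht)]
      rcases List.mem_cons.mp ht with rfl | hts
      · rfl
      · rw [hall _ (List.mem_map_of_mem hts)]
    rw [if_pos hcond]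
    rw [hr, hr1] at hah
    simp at hah
    simp [hah]
  · intro hrhs
    by_cases hcond : (t0 :: ts).all (fun t => PySem.List.pyGet? t (0 : Int) ==
        some ((PySem.List.pyGet? t0 (0 : Int)).getD "")) = true
    · rw [if_pos hcond] at hrhs
      simp only [Option.some.injEq] at hrhs
      rw [List.all_eq_true] at hcond
      have hall : ∀ y ∈ ts.map (fun t => (PySem.List.pyGet? t (0 : Int)).getD ""),
          y = (PySem.List.pyGet? t0 (0 : Int)).getD "" := by
        intro y hy
        obtain ⟨t, hts, rfl⟩ := List.mem_map.mp hy
        have := hcond t (List.mem_cons_of_mem _ hts)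
        rw [beq_iff_eq, hval t (hpre t (List.mem_cons_of_mem _ hts))] at this
        exact Option.some.inj this
      have heq := (pvFoldlAdd_single _ _).mpr hall
      rw [heq]
      simp [hrhs]
    · rw [if_neg hcond] at hrhs
      simp at hrhs

-- ===== VERDICT (by name: the statement is the Claim_ definition above) =====
theorem should_skip_bridge_spec : Claim_equal_should_skip_bridge := by
  intro a b traces _ hpre
  unfold Spec_should_skip_bridge
  rcases traces with _ | ⟨t0, ts⟩
  · cases hga : pvIsInGrp a <;>
      simp [should_skip_bridge, should_skip_bridge_alt, pvLoop1, pvPhase1B, pvSharedAt,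
        pvMinLen, pvLoop2, pvLoop3, pvCase1B, pvCase2B, hga,
        show pvHasGrp = pvIsInGrp from rfl,
        show PySem.List.min? ([] : List Nat) (fun n => n) = none from
          (PySem.List.min?_eq_none_iff _ _).mpr rfl]
  · have hne : (t0 :: ts) ≠ [] := by simp
    simp only [should_skip_bridge, should_skip_bridge_alt]
    rw [pvLoop1_eq a b _ hne, pvStart_eq a _ hne hpre,
      show pvHasGrp = pvIsInGrp from rfl, pvLoop2_eq a b _ hne, pvLoop3_eq a]
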